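-- pv_equiv track=rewrite | github.com/coyo-hm/Algorithm_Study | PROGRAMMERES/Summer, Winter Coding(~2018)/숫자 게임/01_230408.py | solution
-- ===== SOURCE A (Python) =====
-- import collections
--
-- def solution(A, B):
--     answer = 0
--     A.sort()
--     B.sort()
--     A = collections.deque(A)
--     B = collections.deque(B)
--
--     while A and B:
--         a = A.popleft()
--         b = B.popleft()
--         while b <= a and B:
--             b = B.popleft()
--         if b > a:
--             answer += 1
--
--     return answer
-- ===== SOURCE B (Python) =====
-- def solution(A, B):
--     A.sort()
--     B.sort()
--     answer = 0
--     i = 0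
--     for b in B:
--         if i < len(A) and b > A[i]:
--             answer += 1
--             i += 1
--     return answer
-- ===== Notes on version B (the rewrite author's own statement) =====
-- stated objective: simpler
-- what changed: Replaces A's nested while-loops over two deques (pop an element of A, then inner-loop popping B until a beater is found) by a single for-loop over sorted B with one integer pointer into sorted A that advances only on a successful beat.
import Mathlib
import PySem

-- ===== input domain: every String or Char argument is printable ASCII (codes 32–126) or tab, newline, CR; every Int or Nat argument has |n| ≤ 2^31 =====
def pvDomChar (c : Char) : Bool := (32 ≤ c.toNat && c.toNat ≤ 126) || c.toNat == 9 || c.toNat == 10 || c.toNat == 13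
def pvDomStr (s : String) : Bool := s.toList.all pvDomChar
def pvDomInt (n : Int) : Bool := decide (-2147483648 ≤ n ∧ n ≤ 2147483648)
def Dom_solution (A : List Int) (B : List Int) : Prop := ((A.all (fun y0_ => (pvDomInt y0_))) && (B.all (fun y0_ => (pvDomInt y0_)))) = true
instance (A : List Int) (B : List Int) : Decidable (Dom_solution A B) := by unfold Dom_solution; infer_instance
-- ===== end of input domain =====

-- B replaces A's nested deque-popping while-loops by one pass over sorted B with a pointer into sorted A (simpler);
-- both Pythons sort their list arguments in place — the equivalence proved here is about the return value (both mutate identically).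


-- ===== PORT A =====
-- inner `while b <= a and B:` of A: keeps popping from B while the current b is beaten
def pvPopWhile (a b : Int) (B : List Int) : Int × List Int :=
  if b ≤ a then
    match B with
    | [] => (b, [])
    | b' :: rest => pvPopWhile a b' rest
  else (b, B)

-- outer `while A and B:` of A, carrying `answer`
def pvOuter (answer : Int) (A B : List Int) : Int :=
  match A, B with
  | [], _ => answer
  | _ :: _, [] => answer
  | a :: A', b :: B' =>
    let p := pvPopWhile a b B'
    pvOuter (if a < p.1 then answer + 1 else answer) A' p.2

def solution (A : List Int) (B : List Int) : Int :=
  pvOuter 0 (PySem.List.sorted A (fun x => x) false) (PySem.List.sorted B (fun x => x) false)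

-- ===== PORT B =====
-- the `for b in B:` loop of Source B, carrying `answer` and the pointer `i` into (sorted) A
def pvAltGo (as : List Int) (bs : List Int) (answer i : Int) : Int :=
  match bs with
  | [] => answer
  | b :: rest =>
    if i < (as.length : Int) ∧ (PySem.List.pyGet? as i).getD 0 < b then
      pvAltGo as rest (answer + 1) (i + 1)
    else
      pvAltGo as rest answer i

def solution_alt (A : List Int) (B : List Int) : Int :=
  pvAltGo (PySem.List.sorted A (fun x => x) false) (PySem.List.sorted B (fun x => x) false) 0 0

-- ===== PRECONDITION & SPEC =====
def Spec_solution (A : List Int) (B : List Int) (out : Int) : Prop := out = solution_alt A B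
instance (A : List Int) (B : List Int) (out : Int) : Decidable (Spec_solution A B out) := by unfold Spec_solution; infer_instance

-- ===== CLAIM (what is proved, stated in full; the proofs are below) =====
def Claim_equal_solution : Prop := ∀ (A : List Int) (B : List Int), Dom_solution A B → Spec_solution A B (solution A B)

-- ===== LEMMAS AND PROOFS =====

-- common clean recursion both loops compute: match each b (in order) against the current head of as
def pvG (as bs : List Int) : Int :=
  match as, bs with
  | _, [] => 0
  | [], _ :: _ => 0
  | a :: as', b :: bs' => if a < b then 1 + pvG as' bs' else pvG (a :: as') bs'
termination_by bs.length

theorem pvG_nil_right (as : List Int) : pvG as [] = 0 := by cases as <;> simp [pvG]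

theorem pvG_nil_left (bs : List Int) : pvG [] bs = 0 := by cases bs <;> simp [pvG]

theorem pvOuter_aux : ∀ (n : ℕ) (bs : List Int), bs.length ≤ n → ∀ (as : List Int) (ans : Int),
    pvOuter ans as bs = ans + pvG as bs := by
  intro n
  induction n with
  | zero =>
    intro bs hlen as ans
    have hb : bs = [] := by cases bs <;> simp_all
    subst hb
    cases as <;> simp [pvOuter, pvG_nil_right]
  | succ n ih =>
    intro bs hlen as ans
    match as, bs with
    | [], bs => simp [pvOuter, pvG_nil_left]
    | _ :: _, [] => simp [pvOuter, pvG_nil_right]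
    | a :: as', b :: bs' =>
      by_cases hba : b ≤ a
      · match bs' with
        | [] =>
          simp [pvOuter, pvPopWhile, pvG, hba, not_lt.mpr hba]
          cases as' <;> simp [pvOuter, pvG_nil_right]
        | b2 :: bs'' =>
          have h1 : pvOuter ans (a :: as') (b :: b2 :: bs'') =
              pvOuter ans (a :: as') (b2 :: bs'') := by
            simp [pvOuter, pvPopWhile, hba]
          have h2 : pvG (a :: as') (b :: b2 :: bs'') = pvG (a :: as') (b2 :: bs'') := by
            simp [pvG, not_lt.mpr hba]
          rw [h1, h2]
          exact ih (b2 :: bs'') (by simp at hlen ⊢; omega) _ _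
      · rw [not_le] at hba
        have hp : pvPopWhile a b bs' = (b, bs') := by
          rw [pvPopWhile.eq_def, if_neg (not_le.mpr hba)]
        have h1 : pvOuter ans (a :: as') (b :: bs') = pvOuter (ans + 1) as' bs' := by
          simp [pvOuter, hp, hba]
        rw [h1, ih bs' (by simp at hlen; omega) as' (ans + 1)]
        simp [pvG, hba]
        ring

theorem pvOuter_eq_pvG (as bs : List Int) (ans : Int) : pvOuter ans as bs = ans + pvG as bs :=
  pvOuter_aux bs.length bs le_rfl as ans

theorem pvAltGo_eq_pvG (bs : List Int) : ∀ (as : List Int) (i : ℕ) (ans : Int),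
    pvAltGo as bs ans (i : Int) = ans + pvG (as.drop i) bs := by
  induction bs with
  | nil => intro as i ans; simp [pvAltGo, pvG_nil_right]
  | cons b bs' ih =>
    intro as i ans
    by_cases hi : i < as.length
    · have hdrop : as.drop i = as[i] :: as.drop (i + 1) := List.drop_eq_getElem_cons hi
      have hget : (PySem.List.pyGet? as (i : Int)).getD 0 = as[i] := by
        simp [PySem.List.pyGet?, PySem.List.pyIdx?, hi]
      by_cases hb : as[i] < b
      · have hstep : pvAltGo as (b :: bs') ans (i : Int) = pvAltGo as bs' (ans + 1) ((i : Int) + 1) := by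
          simp only [pvAltGo]
          rw [if_pos ⟨by exact_mod_cast hi, by rw [hget]; exact hb⟩]
        have hcast : ((i : Int) + 1) = ((i + 1 : ℕ) : Int) := by push_cast; ring
        rw [hstep, hcast, ih as (i + 1) (ans + 1), hdrop]
        simp only [pvG]
        rw [if_pos hb]
        omega
      · have hstep : pvAltGo as (b :: bs') ans (i : Int) = pvAltGo as bs' ans (i : Int) := by
          simp only [pvAltGo]
          rw [if_neg (fun h => hb (hget ▸ h.2))]
        rw [hstep, ih as i ans, hdrop]
        simp only [pvG]
        rw [if_neg hb]
    · have hd : as.drop i = [] := List.drop_eq_nil_of_le (by omega)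
      have hstep : pvAltGo as (b :: bs') ans (i : Int) = pvAltGo as bs' ans (i : Int) := by
        simp only [pvAltGo]
        rw [if_neg (fun h => hi (by exact_mod_cast h.1))]
      rw [hstep, ih as i ans, hd]
      simp [pvG_nil_left]

-- ===== VERDICT (by name: the statement is the Claim_ definition above) =====
theorem solution_spec : Claim_equal_solution := by
  intro A B _
  unfold Spec_solution solution solution_alt
  rw [pvOuter_eq_pvG]
  have h := pvAltGo_eq_pvG (PySem.List.sorted B (fun x => x) false)
      (PySem.List.sorted A (fun x => x) false) 0 0
  simp only [Nat.cast_zero, List.drop_zero, zero_add] at h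
  rw [h]
  omega
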